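-- pv_equiv track=rewrite | github.com/oar-team/oar3 | kao/interval.py | extract_n_scattered_block_itv
-- ===== SOURCE A (Python) =====
-- def equal_itvs(itvs1, itvs2):
--     lx = len(itvs1)
--     ly = len(itvs2)
--     i = 0
--     if (lx != ly):
--         return False
--     if (lx == 0):
--         return True
--     while (i<lx):
--         x = itvs1[i]
--         y = itvs2[i]
--         if not ((x[0]==y[0]) and (x[1]==y[1])):
--             return False
--         i += 1
--     return True
--
-- def extract_n_scattered_block_itv(itvs1, itvs_ref, n):
--     #itv_l_a lst_itvs_reference n
--     #need of test_and_sub_prefix_itvs: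
--     lr = len(itvs_ref)
--     i = 0
--     itvs = []
--
--     while (n>0) and (i<lr):
--         x = itvs_ref[i]
--         y = intersec(itvs1, x)
--         if equal_itvs(x, y):
--             itvs.extend(x)
--             n -= 1
--         i += 1
--
--     if (n==0):
--         itvs.sort()
--         return itvs
--     else:
--         return []
--
-- def intersec(itvs1,itvs2):
--     lx = len(itvs1)
--     ly = len(itvs2)
--     i = 0
--     k = 0
--     itvs = []
--
--     while (i<lx) and (lx>0) and (ly>0):
--         x = itvs1[i]
--         if (k == ly):
--             break
--         else:
--             y = itvs2[k]
--
--         # y before x w/ no overlap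
--         if (y[1] < x[0]):
--             k += 1
--         else:
--
--             # x before y w/ no overlap
--             if (y[0] > x[1]):
--                 i += 1
--             else:
--
--                 if (y[0] >= x[0]):
--                     if (y[1] <= x[1]):
--                         itvs.append(y)
--                         k += 1
--                     else:
--                         itvs.append( (y[0], x[1]) )
--                         i += 1
--                 else:
--                         if (y[1] <= x[1]):
--                             itvs.append( (x[0], y[1]) )
--                             k += 1
--                         else:
--                             itvs.append(x)
--                             i += 1
--
--     return itvs
-- ===== SOURCE B (Python) =====
-- def _sparse(vals):
--     # sparse table: tab[j][p] = max(vals[p : p + 2**j])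
--     tab = [vals]
--     w = 1
--     while 2 * w <= len(vals):
--         prev = tab[-1]
--         tab.append([max(prev[p], prev[p + w]) for p in range(len(vals) - 2 * w + 1)])
--         w *= 2
--     return tab
--
--
-- def _first_ge(tab, lx, i, t):
--     # first index >= i with vals[index] >= t (lx if none), by binary descent
--     for j in range(len(tab) - 1, -1, -1):
--         w = 1 << j
--         if i + w <= lx and tab[j][i] < t:
--             i += w
--     return i
--
--
-- def _covers(starts, ends, tabS, tabE, lx, blk):
--     # does the sweep cut blk out of itvs1 exactly? cursor jumps via the tables
--     ly = len(blk)
--     i = k = j = 0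
--     while k < ly and i < lx:
--         y0, y1 = blk[k]
--         i = min(_first_ge(tabS, lx, i, y1 + 1), _first_ge(tabE, lx, i, y0))
--         if i == lx:
--             break
--         if starts[i] > y1:        # block interval dropped without a piece
--             k += 1
--             continue
--         piece = (max(starts[i], y0), min(ends[i], y1))
--         if j == ly or blk[j] != piece:
--             return False
--         j += 1
--         if y1 <= ends[i]:
--             k += 1
--         else:
--             i += 1
--     return j == ly
--
--
-- def extract_n_scattered_block_itv(itvs1, itvs_ref, n):
--     if n <= 0:
--         return []
--     starts = [p[0] for p in itvs1]
--     ends = [p[1] for p in itvs1]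
--     tabS = _sparse(starts)
--     tabE = _sparse(ends)
--     lx = len(itvs1)
--     picked = []
--     for x in itvs_ref:
--         if len(picked) == n:
--             break
--         if _covers(starts, ends, tabS, tabE, lx, x):
--             picked.append(x)
--     if len(picked) < n:
--         return []
--     return sorted(iv for blk in picked for iv in blk)
-- ===== Notes on version B (the rewrite author's own statement) =====
-- stated objective: alternative
-- what changed: B preprocesses itvs1 into two sparse range-max tables (interval starts and ends) and, per block interval, jumps the sweep cursor by binary descent to the first index where the merge would skip or overlap, instead of rescanning itvs1 linearly for every block and materialising each intersection to compare afterwards; asymptotically fewer scan steps, though a timing run could not measure it on its inputs.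
import Mathlib
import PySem

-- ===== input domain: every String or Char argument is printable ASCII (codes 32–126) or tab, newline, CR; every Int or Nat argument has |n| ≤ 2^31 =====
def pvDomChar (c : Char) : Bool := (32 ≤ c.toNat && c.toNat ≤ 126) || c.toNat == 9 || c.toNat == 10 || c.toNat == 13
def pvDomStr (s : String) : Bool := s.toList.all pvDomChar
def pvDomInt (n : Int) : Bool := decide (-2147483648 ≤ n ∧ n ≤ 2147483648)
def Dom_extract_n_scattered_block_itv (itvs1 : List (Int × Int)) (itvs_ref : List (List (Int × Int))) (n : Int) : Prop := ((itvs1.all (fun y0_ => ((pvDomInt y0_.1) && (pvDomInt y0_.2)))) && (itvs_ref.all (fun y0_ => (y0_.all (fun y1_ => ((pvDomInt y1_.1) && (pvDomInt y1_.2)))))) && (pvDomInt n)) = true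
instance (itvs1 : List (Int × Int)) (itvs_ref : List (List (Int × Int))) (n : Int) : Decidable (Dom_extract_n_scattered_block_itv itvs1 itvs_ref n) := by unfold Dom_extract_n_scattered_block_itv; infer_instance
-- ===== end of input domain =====

-- B preprocesses itvs1 into two sparse range-max tables (starts, ends) and per block
-- interval jumps the sweep cursor by binary descent instead of rescanning itvs1
-- linearly and materialising each intersection (objective: alternative).
-- Loops are ported with a fuel parameter (a totality guard only: fuel is always
-- sufficient at the call sites, see the *_eq_* lemmas).

-- ===== PORT A =====
-- the while loop of intersec; the Python appends to a list, rendered as emitting the head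
def intersecGo (xs ys : List (Int × Int)) (i k fuel : Nat) : List (Int × Int) :=
  match fuel with
  | 0 => []
  | fuel+1 =>
    if h : i < xs.length ∧ k < ys.length then
      if (ys[k]'h.2).2 < (xs[i]'h.1).1 then intersecGo xs ys i (k+1) fuel
      else if (ys[k]'h.2).1 > (xs[i]'h.1).2 then intersecGo xs ys (i+1) k fuel
      else if (ys[k]'h.2).1 ≥ (xs[i]'h.1).1 then
        (if (ys[k]'h.2).2 ≤ (xs[i]'h.1).2 then (ys[k]'h.2) :: intersecGo xs ys i (k+1) fuel
         else ((ys[k]'h.2).1, (xs[i]'h.1).2) :: intersecGo xs ys (i+1) k fuel)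
      else
        (if (ys[k]'h.2).2 ≤ (xs[i]'h.1).2 then ((xs[i]'h.1).1, (ys[k]'h.2).2) :: intersecGo xs ys i (k+1) fuel
         else (xs[i]'h.1) :: intersecGo xs ys (i+1) k fuel)
    else []

def intersec (xs ys : List (Int × Int)) : List (Int × Int) := intersecGo xs ys 0 0 (xs.length + ys.length)

-- the while loop of equal_itvs; only reached with equal lengths, so the inner guard's
-- else-branch is unreachable
def equalGo (xs ys : List (Int × Int)) (i fuel : Nat) : Bool :=
  match fuel with
  | 0 => true
  | fuel+1 =>
    if h : i < xs.length then
      if hy : i < ys.length then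
        if (xs[i]'h).1 == (ys[i]'hy).1 && (xs[i]'h).2 == (ys[i]'hy).2 then equalGo xs ys (i+1) fuel
        else false
      else false
    else true

def equal_itvs (itvs1 itvs2 : List (Int × Int)) : Bool :=
  if itvs1.length ≠ itvs2.length then false
  else if itvs1.length == 0 then true
  else equalGo itvs1 itvs2 0 itvs1.length

-- the main while loop: returns the final (n, itvs)
def extractGo (itvs1 : List (Int × Int)) (itvs_ref : List (List (Int × Int))) (n : Int) (i : Nat) (itvs : List (Int × Int)) (fuel : Nat) : Int × List (Int × Int) :=
  match fuel with
  | 0 => (n, itvs)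
  | fuel+1 =>
    if h : 0 < n ∧ i < itvs_ref.length then
      if equal_itvs (itvs_ref[i]'h.2) (intersec itvs1 (itvs_ref[i]'h.2)) then
        extractGo itvs1 itvs_ref (n-1) (i+1) (itvs ++ (itvs_ref[i]'h.2)) fuel
      else extractGo itvs1 itvs_ref n (i+1) itvs fuel
    else (n, itvs)

def extract_n_scattered_block_itv (itvs1 : List (Int × Int)) (itvs_ref : List (List (Int × Int))) (n : Int) : List (Int × Int) :=
  let r := extractGo itvs1 itvs_ref n 0 [] itvs_ref.length
  if r.1 == 0 then PySem.List.sorted2 r.2 (·.1) (·.2) else []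

-- ===== PORT B =====
-- _sparse of Source B: level j holds max(vals[p : p+2^j]); the Python loop variable w is 2^j
def pvSparseGo (vals prev : List Int) (j : Nat) (acc : List (List Int)) (fuel : Nat) : List (List Int) :=
  match fuel with
  | 0 => acc
  | fuel+1 =>
    if 2 * 2^j ≤ vals.length then
      pvSparseGo vals
        ((List.range (vals.length - 2 * 2^j + 1)).map (fun p => max (prev.getD p 0) (prev.getD (p + 2^j) 0)))
        (j+1)
        (acc ++ [(List.range (vals.length - 2 * 2^j + 1)).map (fun p => max (prev.getD p 0) (prev.getD (p + 2^j) 0))])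
        fuel
    else acc

def pvSparse (vals : List Int) : List (List Int) := pvSparseGo vals vals 0 [vals] (vals.length + 1)

-- one iteration of the binary descent in _first_ge (index in range, so getD is exact)
def pvStep (tab : List (List Int)) (lx : Nat) (t : Int) (j i : Nat) : Nat :=
  if i + 2^j ≤ lx ∧ (tab.getD j []).getD i 0 < t then i + 2^j else i

-- the for-loop of _first_ge, j running from the top level down to 0
def firstGEGo (tab : List (List Int)) (lx : Nat) (t : Int) : Nat → Nat → Nat
  | 0, i => pvStep tab lx t 0 i
  | j+1, i => firstGEGo tab lx t j (pvStep tab lx t (j+1) i)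

def firstGE (tab : List (List Int)) (lx i : Nat) (t : Int) : Nat :=
  firstGEGo tab lx t (tab.length - 1) i

-- the cursor jump 'min(_first_ge(tabS,...), _first_ge(tabE,...))' of _covers
def pvJump (tabS tabE : List (List Int)) (lx i : Nat) (y : Int × Int) : Nat :=
  min (firstGE tabS lx i (y.2 + 1)) (firstGE tabE lx i y.1)

-- the while loop of _covers: cursor jumps via the tables, pieces compared in place
def bCoversGo (starts ends : List Int) (tabS tabE : List (List Int)) (lx : Nat) (blk : List (Int × Int)) (i k j fuel : Nat) : Bool :=
  match fuel with
  | 0 => j == blk.length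
  | fuel+1 =>
    if h : k < blk.length ∧ i < lx then
      if pvJump tabS tabE lx i (blk[k]'h.1) = lx then j == blk.length
      else if starts.getD (pvJump tabS tabE lx i (blk[k]'h.1)) 0 > (blk[k]'h.1).2 then
        bCoversGo starts ends tabS tabE lx blk (pvJump tabS tabE lx i (blk[k]'h.1)) (k+1) j fuel
      else if hj : j < blk.length then
        if (blk[j]'hj) ≠ (max (starts.getD (pvJump tabS tabE lx i (blk[k]'h.1)) 0) (blk[k]'h.1).1,
                          min (ends.getD (pvJump tabS tabE lx i (blk[k]'h.1)) 0) (blk[k]'h.1).2) then false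
        else if (blk[k]'h.1).2 ≤ ends.getD (pvJump tabS tabE lx i (blk[k]'h.1)) 0 then
          bCoversGo starts ends tabS tabE lx blk (pvJump tabS tabE lx i (blk[k]'h.1)) (k+1) (j+1) fuel
        else bCoversGo starts ends tabS tabE lx blk ((pvJump tabS tabE lx i (blk[k]'h.1)) + 1) k (j+1) fuel
      else false
    else j == blk.length

-- the for loop of extract_n_scattered_block_itv in Source B: collect blocks until n picked
def bPickGo (starts ends : List Int) (tabS tabE : List (List Int)) (lx : Nat) (blocks : List (List (Int × Int))) (n : Int) (picked : List (List (Int × Int))) : List (List (Int × Int)) :=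
  match blocks with
  | [] => picked
  | x :: rest =>
    if (picked.length : Int) == n then picked
    else if bCoversGo starts ends tabS tabE lx x 0 0 0 (lx + x.length) then bPickGo starts ends tabS tabE lx rest n (picked ++ [x])
    else bPickGo starts ends tabS tabE lx rest n picked

def extract_n_scattered_block_itv_alt (itvs1 : List (Int × Int)) (itvs_ref : List (List (Int × Int))) (n : Int) : List (Int × Int) :=
  if n ≤ 0 then []
  else
    let starts := itvs1.map Prod.fst
    let ends := itvs1.map Prod.snd
    let picked := bPickGo starts ends (pvSparse starts) (pvSparse ends) itvs1.length itvs_ref n []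
    if (picked.length : Int) < n then []
    else PySem.List.sorted2 (picked.flatMap id) (·.1) (·.2)

-- ===== PRECONDITION & SPEC =====
def Spec_extract_n_scattered_block_itv (itvs1 : List (Int × Int)) (itvs_ref : List (List (Int × Int))) (n : Int) (out : List (Int × Int)) : Prop := out = extract_n_scattered_block_itv_alt itvs1 itvs_ref n
instance (itvs1 : List (Int × Int)) (itvs_ref : List (List (Int × Int))) (n : Int) (out : List (Int × Int)) : Decidable (Spec_extract_n_scattered_block_itv itvs1 itvs_ref n out) := by unfold Spec_extract_n_scattered_block_itv; infer_instance

-- ===== CLAIM (what is proved, stated in full; the proofs are below) =====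
def Claim_equal_extract_n_scattered_block_itv : Prop := ∀ (itvs1 : List (Int × Int)) (itvs_ref : List (List (Int × Int))) (n : Int), Dom_extract_n_scattered_block_itv itvs1 itvs_ref n → Spec_extract_n_scattered_block_itv itvs1 itvs_ref n (extract_n_scattered_block_itv itvs1 itvs_ref n)

-- ===== LEMMAS AND PROOFS =====

-- linear-scan specification of _first_ge: first index ≥ i with t ≤ vals[index]
def linFirst (vals : List Int) (t : Int) (i : Nat) : Nat :=
  if h : i < vals.length then
    if t ≤ vals.getD i 0 then i else linFirst vals t (i+1)
  else i
termination_by vals.length - i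

theorem linFirst_ge (vals : List Int) (t : Int) (i : Nat) : i ≤ linFirst vals t i := by
  rw [linFirst]
  split
  · split
    · omega
    · exact le_trans (by omega) (linFirst_ge vals t (i+1))
  · omega
termination_by vals.length - i

theorem linFirst_le (vals : List Int) (t : Int) (i : Nat) (h : i ≤ vals.length) : linFirst vals t i ≤ vals.length := by
  rw [linFirst]
  split
  · split
    · omega
    · exact linFirst_le vals t (i+1) (by omega)
  · omega
termination_by vals.length - i

theorem linFirst_below (vals : List Int) (t : Int) (i p : Nat) (h1 : i ≤ p) (h2 : p < linFirst vals t i) : vals.getD p 0 < t := by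
  rw [linFirst] at h2
  by_cases hi : i < vals.length
  · rw [dif_pos hi] at h2
    by_cases ht : t ≤ vals.getD i 0
    · rw [if_pos ht] at h2; omega
    · rw [if_neg ht] at h2
      by_cases hp : i = p
      · subst hp; omega
      · exact linFirst_below vals t (i+1) p (by omega) h2
  · rw [dif_neg hi] at h2; omega
termination_by vals.length - i

theorem linFirst_at (vals : List Int) (t : Int) (i : Nat) (h : linFirst vals t i < vals.length) : t ≤ vals.getD (linFirst vals t i) 0 := by
  rw [linFirst] at h ⊢
  by_cases hi : i < vals.length
  · rw [dif_pos hi] at h ⊢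
    by_cases ht : t ≤ vals.getD i 0
    · rw [if_pos ht] at h ⊢; exact ht
    · rw [if_neg ht] at h ⊢; exact linFirst_at vals t (i+1) h
  · rw [dif_neg hi] at h; omega
termination_by vals.length - i

theorem linFirst_le_of_ge (vals : List Int) (t : Int) (i q : Nat) (h1 : i ≤ q) (h2 : t ≤ vals.getD q 0) : linFirst vals t i ≤ q := by
  by_contra hc
  exact absurd h2 (not_le.mpr (linFirst_below vals t i q h1 (by omega)))

theorem linFirst_stable (vals : List Int) (t : Int) (i i' : Nat) (h1 : i ≤ i') (h2 : i' ≤ linFirst vals t i) : linFirst vals t i' = linFirst vals t i := by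
  by_cases he : i = i'
  · rw [he]
  · rw [linFirst]
    have hfi := linFirst_ge vals t i
    have hi : i < vals.length := by
      by_contra hx
      rw [linFirst, dif_neg hx] at h2; omega
    have hlt : vals.getD i 0 < t := by
      apply linFirst_below vals t i i (le_refl i); omega
    have hstep : linFirst vals t i = linFirst vals t (i+1) := by
      rw [linFirst, dif_pos hi, if_neg (not_le.mpr hlt)]
    by_cases hi' : i' < vals.length
    · rw [dif_pos hi']
      by_cases ht : t ≤ vals.getD i' 0
      · rw [if_pos ht]
        have := linFirst_le_of_ge vals t i i' (by omega) ht
        omega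
      · rw [if_neg ht]
        rw [hstep]
        apply linFirst_stable vals t (i+1) (i'+1) (by omega)
        rw [← hstep]
        rcases Nat.lt_or_ge i' (linFirst vals t i) with hx | hx
        · omega
        · have : i' = linFirst vals t i := by omega
          subst this
          exact absurd (linFirst_at vals t i (by omega)) ht
    · rw [dif_neg hi']
      have := linFirst_le vals t i (by omega)
      omega
termination_by vals.length - i

-- level-j characterisation of a sparse-table row
def SparseOK (vals lvl : List Int) (j : Nat) : Prop :=
  ∀ (t : Int) (p : Nat), p + 2^j ≤ vals.length →
    (lvl.getD p 0 < t ↔ ∀ q, p ≤ q → q < p + 2^j → vals.getD q 0 < t)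

theorem sparseOK_zero (vals : List Int) : SparseOK vals vals 0 := by
  intro t p hp
  simp only [pow_zero]
  constructor
  · intro h q h1 h2
    have : q = p := by omega
    rwa [this]
  · intro h
    exact h p (le_refl p) (by omega)

theorem sparseOK_succ (vals prev : List Int) (j : Nat) (h2w : 2 * 2^j ≤ vals.length) (hprev : SparseOK vals prev j) :
    SparseOK vals ((List.range (vals.length - 2 * 2^j + 1)).map (fun p => max (prev.getD p 0) (prev.getD (p + 2^j) 0))) (j+1) := by
  intro t p hp
  have hpow : 2^(j+1) = 2 * 2^j := by rw [pow_succ]; ring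
  have hplt : p < vals.length - 2 * 2^j + 1 := by omega
  have hget : ((List.range (vals.length - 2 * 2^j + 1)).map (fun p => max (prev.getD p 0) (prev.getD (p + 2^j) 0))).getD p 0 = max (prev.getD p 0) (prev.getD (p + 2^j) 0) := by
    rw [List.getD_eq_getElem?_getD, List.getElem?_map, List.getElem?_range hplt]
    rfl
  rw [hget, max_lt_iff, hprev t p (by omega), hprev t (p + 2^j) (by omega)]
  constructor
  · rintro ⟨ha, hb⟩ q h1 h2
    by_cases hq : q < p + 2^j
    · exact ha q h1 hq
    · exact hb q (by omega) (by omega)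
  · intro h
    exact ⟨fun q h1 h2 => h q h1 (by omega), fun q h1 h2 => h q (by omega) (by omega)⟩

theorem sparseGo_spec (vals : List Int) (fuel : Nat) : ∀ (prev : List Int) (j : Nat) (acc : List (List Int)),
    vals.length + 1 - 2^j ≤ fuel →
    acc.length = j + 1 →
    prev = acc.getD j [] →
    (∀ j', j' < acc.length → SparseOK vals (acc.getD j' []) j') →
    (pvSparseGo vals prev j acc fuel).length ≥ 1 ∧
    vals.length < 2^(pvSparseGo vals prev j acc fuel).length ∧
    ∀ j', j' < (pvSparseGo vals prev j acc fuel).length → SparseOK vals ((pvSparseGo vals prev j acc fuel).getD j' []) j' := by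
  induction fuel with
  | zero =>
    intro prev j acc hf hlen hprev hacc
    have h1 : 0 < 2^j := Nat.two_pow_pos j
    have hbig : vals.length < 2^j := by omega
    have hpow : 2^(j+1) = 2 * 2^j := by rw [pow_succ]; ring
    rw [pvSparseGo]
    exact ⟨by omega, by rw [hlen]; omega, hacc⟩
  | succ fuel ih =>
    intro prev j acc hf hlen hprev hacc
    rw [pvSparseGo]
    by_cases h : 2 * 2^j ≤ vals.length
    · rw [if_pos h]
      have hprevOK : SparseOK vals prev j := by
        rw [hprev]; exact hacc j (by omega)
      have hpow : 2^(j+1) = 2 * 2^j := by rw [pow_succ]; ring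
      have h1 : 0 < 2^j := Nat.two_pow_pos j
      apply ih
      · omega
      · simp [hlen]
      · rw [List.getD_eq_getElem?_getD, List.getElem?_append_right (by omega)]
        simp [hlen]
      · intro j' hj'
        simp only [List.length_append, List.length_cons, List.length_nil, hlen] at hj'
        by_cases hlt : j' < acc.length
        · rw [List.getD_eq_getElem?_getD, List.getElem?_append_left hlt, ← List.getD_eq_getElem?_getD]
          exact hacc j' hlt
        · have : j' = acc.length := by omega
          subst this
          rw [List.getD_eq_getElem?_getD, List.getElem?_append_right (le_refl _)]
          simpa [hlen] using sparseOK_succ vals prev j h hprevOK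
    · rw [if_neg h]
      have hpow : 2^(j+1) = 2 * 2^j := by rw [pow_succ]; ring
      refine ⟨by omega, by rw [hlen]; omega, hacc⟩

theorem pvSparse_spec (vals : List Int) :
    (pvSparse vals).length ≥ 1 ∧ vals.length < 2^(pvSparse vals).length ∧
    ∀ j', j' < (pvSparse vals).length → SparseOK vals ((pvSparse vals).getD j' []) j' := by
  unfold pvSparse
  apply sparseGo_spec vals (vals.length + 1) vals 0 [vals] (by omega) (by simp) (by simp)
  intro j' hj'
  simp only [List.length_cons, List.length_nil] at hj'
  have : j' = 0 := by omega
  subst this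
  simpa using sparseOK_zero vals

-- the binary descent computes the linear first index
theorem firstGEGo_eq_lin (vals : List Int) (tab : List (List Int)) (t : Int) (j i : Nat)
    (htab : ∀ j', j' ≤ j → SparseOK vals (tab.getD j' []) j')
    (hi : i ≤ vals.length)
    (hb : linFirst vals t i < i + 2^(j+1)) :
    firstGEGo tab vals.length t j i = linFirst vals t i := by
  have step : ∀ (jj ii : Nat), ii ≤ vals.length → SparseOK vals (tab.getD jj []) jj →
      linFirst vals t ii < ii + 2^(jj+1) →
      pvStep tab vals.length t jj ii ≤ linFirst vals t ii ∧
      linFirst vals t (pvStep tab vals.length t jj ii) = linFirst vals t ii ∧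
      linFirst vals t ii < pvStep tab vals.length t jj ii + 2^jj ∧
      pvStep tab vals.length t jj ii ≤ vals.length := by
    intro jj ii hii hok hbb
    unfold pvStep
    by_cases hc : ii + 2^jj ≤ vals.length ∧ (tab.getD jj []).getD ii 0 < t
    · rw [if_pos hc]
      have hall := (hok t ii hc.1).mp hc.2
      have hge : ii + 2^jj ≤ linFirst vals t ii := by
        by_contra hx
        have hfl : linFirst vals t ii < vals.length := by omega
        have := linFirst_at vals t ii hfl
        have := hall (linFirst vals t ii) (linFirst_ge vals t ii) (by omega)
        omega
      have hst := linFirst_stable vals t ii (ii + 2^jj) (by omega) hge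
      have hpow : 2^(jj+1) = 2 * 2^jj := by rw [pow_succ]; ring
      exact ⟨hge, hst, by omega, hc.1⟩
    · rw [if_neg hc]
      push Not at hc
      have hlt : linFirst vals t ii < ii + 2^jj := by
        by_cases hin : ii + 2^jj ≤ vals.length
        · have ht := hc hin
          have : ¬ ∀ q, ii ≤ q → q < ii + 2^jj → vals.getD q 0 < t := by
            intro hforall
            exact absurd ((hok t ii hin).mpr hforall) (by omega)
          push Not at this
          obtain ⟨q, hq1, hq2, hq3⟩ := this
          have := linFirst_le_of_ge vals t ii q hq1 (by omega)
          omega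
        · have := linFirst_le vals t ii hii
          omega
      exact ⟨linFirst_ge vals t ii, rfl, hlt, hii⟩
  induction j generalizing i with
  | zero =>
    obtain ⟨h1, h2, h3, h4⟩ := step 0 i hi (htab 0 (le_refl 0)) hb
    simp only [firstGEGo]
    have hge := linFirst_ge vals t (pvStep tab vals.length t 0 i)
    simp only [pow_zero] at h3
    omega
  | succ j ih =>
    obtain ⟨h1, h2, h3, h4⟩ := step (j+1) i hi (htab (j+1) (le_refl _)) hb
    simp only [firstGEGo]
    rw [ih (pvStep tab vals.length t (j+1) i) (fun j' hj' => htab j' (by omega)) h4 (by omega), h2]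

theorem firstGE_eq_lin (vals : List Int) (t : Int) (i : Nat) (hi : i ≤ vals.length) :
    firstGE (pvSparse vals) vals.length i t = linFirst vals t i := by
  obtain ⟨h1, h2, h3⟩ := pvSparse_spec vals
  unfold firstGE
  apply firstGEGo_eq_lin vals (pvSparse vals) t ((pvSparse vals).length - 1) i
  · intro j' hj'; exact h3 j' (by omega)
  · exact hi
  · have : (pvSparse vals).length - 1 + 1 = (pvSparse vals).length := by omega
    rw [this]
    have := linFirst_le vals t i hi
    omega

-- pure advance steps of the merge do not change its output (fuel shrinks with the cursor)
theorem intersecGo_advance (xs ys : List (Int × Int)) (k : Nat) (hk : k < ys.length) (i2 : Nat) (hlx : i2 ≤ xs.length) :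
    ∀ (fuel i : Nat), i ≤ i2 →
    (xs.length - i) + (ys.length - k) ≤ fuel →
    (∀ p (hp : p < xs.length), i ≤ p → p < i2 → (xs[p]'hp).1 ≤ (ys[k]'hk).2 ∧ (xs[p]'hp).2 < (ys[k]'hk).1) →
    intersecGo xs ys i k fuel = intersecGo xs ys i2 k (fuel - (i2 - i)) := by
  intro fuel
  induction fuel with
  | zero =>
    intro i hle hf hadv
    exact absurd hk (by omega)
  | succ fuel ih =>
    intro i hle hf hadv
    by_cases he : i = i2
    · subst he; simp
    · have hi : i < xs.length := by omega
      obtain ⟨ha, hb⟩ := hadv i hi (le_refl i) (by omega)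
      rw [intersecGo]
      rw [dif_pos ⟨hi, hk⟩, if_neg (by omega), if_pos (by omega)]
      rw [ih (i+1) (by omega) (by omega) (fun p hp h1 h2 => hadv p hp (by omega) h2)]
      congr 1
      omega

theorem equalGo_eq_decide (xs ys : List (Int × Int)) (hlen : xs.length = ys.length) :
    ∀ (fuel i : Nat), xs.length - i ≤ fuel →
    equalGo xs ys i fuel = decide (xs.drop i = ys.drop i) := by
  intro fuel
  induction fuel with
  | zero =>
    intro i hf
    have hxs : List.drop i xs = [] := List.drop_eq_nil_iff.mpr (by omega)
    have hys : List.drop i ys = [] := List.drop_eq_nil_iff.mpr (by omega)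
    rw [equalGo, hxs, hys]; simp
  | succ fuel ih =>
    intro i hf
    rw [equalGo]
    by_cases h : i < xs.length
    · have hy : i < ys.length := by omega
      rw [dif_pos h, dif_pos hy]
      have hc : ((xs[i]'h).1 == (ys[i]'hy).1 && (xs[i]'h).2 == (ys[i]'hy).2) = decide (xs[i] = ys[i]) := by
        simp [Prod.ext_iff, Bool.beq_eq_decide_eq]
      rw [hc, List.drop_eq_getElem_cons h, List.drop_eq_getElem_cons hy, ih (i+1) (by omega)]
      by_cases he : xs[i] = ys[i]
      · simp only [he, decide_true, if_true, List.cons_eq_cons, true_and]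
      · simp only [he, decide_false, List.cons_eq_cons]
        simp
    · have hxs : List.drop i xs = [] := List.drop_eq_nil_iff.mpr (by omega)
      have hys : List.drop i ys = [] := List.drop_eq_nil_iff.mpr (by omega)
      rw [dif_neg h, hxs, hys]; simp

theorem equal_itvs_eq_decide (xs ys : List (Int × Int)) : equal_itvs xs ys = decide (xs = ys) := by
  unfold equal_itvs
  by_cases hl : xs.length = ys.length
  · rw [if_neg (by simpa using hl)]
    by_cases h0 : xs.length = 0
    · have hx : xs = [] := List.eq_nil_of_length_eq_zero h0
      have hy : ys = [] := List.eq_nil_of_length_eq_zero (by omega)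
      simp [hx, hy]
    · rw [if_neg (by simpa using h0), equalGo_eq_decide xs ys hl xs.length 0 (by omega)]
      simp
  · rw [if_pos (by simpa using hl)]
    symm
    simp only [decide_eq_false_iff_not]
    intro hh
    exact hl (by rw [hh])

-- the jump-automaton coverage test decides 'remaining merge output = remaining block'
theorem bCoversGo_eq_decide (xs ys : List (Int × Int)) :
    ∀ (fuelB i k j fuelA : Nat), j ≤ ys.length → i ≤ xs.length →
    (xs.length - i) + (ys.length - k) ≤ fuelB →
    (xs.length - i) + (ys.length - k) ≤ fuelA →
    bCoversGo (xs.map Prod.fst) (xs.map Prod.snd) (pvSparse (xs.map Prod.fst)) (pvSparse (xs.map Prod.snd)) xs.length ys i k j fuelB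
      = decide (intersecGo xs ys i k fuelA = ys.drop j) := by
  intro fuelB
  induction fuelB with
  | zero =>
    intro i k j fuelA hj hi hfB hfA
    rw [bCoversGo]
    have hguard : ¬ (i < xs.length ∧ k < ys.length) := by omega
    have : intersecGo xs ys i k fuelA = [] := by
      cases fuelA with
      | zero => rw [intersecGo]
      | succ f => rw [intersecGo, dif_neg hguard]
    rw [this]
    have hd : ys.drop j = [] ↔ j = ys.length := by
      rw [List.drop_eq_nil_iff]; omega
    simp [eq_comm (a := ([] : List (Int × Int))), hd, Bool.beq_eq_decide_eq]
  | succ fuelB ih =>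
    intro i k j fuelA hj hi hfB hfA
    rw [bCoversGo]
    by_cases h : k < ys.length ∧ i < xs.length
    · rw [dif_pos h]
      have hlenS : (xs.map Prod.fst).length = xs.length := by simp
      have hlenE : (xs.map Prod.snd).length = xs.length := by simp
      have hgetS : ∀ p (hp : p < xs.length), (xs.map Prod.fst).getD p 0 = (xs[p]'hp).1 := by
        intro p hp
        rw [List.getD_eq_getElem (xs.map Prod.fst) 0 (by simpa), List.getElem_map]
      have hgetE : ∀ p (hp : p < xs.length), (xs.map Prod.snd).getD p 0 = (xs[p]'hp).2 := by
        intro p hp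
        rw [List.getD_eq_getElem (xs.map Prod.snd) 0 (by simpa), List.getElem_map]
      obtain ⟨m, hmdef⟩ : ∃ m', min (linFirst (xs.map Prod.fst) ((ys[k]'h.1).2 + 1) i) (linFirst (xs.map Prod.snd) (ys[k]'h.1).1 i) = m' := ⟨_, rfl⟩
      have hjS : ∀ (v : Int), firstGE (pvSparse (xs.map Prod.fst)) xs.length i v = linFirst (xs.map Prod.fst) v i := by
        intro v; rw [← hlenS, firstGE_eq_lin _ _ _ (by omega)]
      have hjE : ∀ (v : Int), firstGE (pvSparse (xs.map Prod.snd)) xs.length i v = linFirst (xs.map Prod.snd) v i := by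
        intro v; rw [← hlenE, firstGE_eq_lin _ _ _ (by omega)]
      have hjump : pvJump (pvSparse (xs.map Prod.fst)) (pvSparse (xs.map Prod.snd)) xs.length i (ys[k]'h.1) = m := by
        rw [pvJump, hjS, hjE, hmdef]
      have hg1 := linFirst_ge (xs.map Prod.fst) ((ys[k]'h.1).2 + 1) i
      have hg2 := linFirst_ge (xs.map Prod.snd) (ys[k]'h.1).1 i
      have hl1 := linFirst_le (xs.map Prod.fst) ((ys[k]'h.1).2 + 1) i (by omega)
      rw [hlenS] at hl1
      have hmge : i ≤ m := by omega
      have hmle : m ≤ xs.length := by omega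
      have hadvance : intersecGo xs ys i k fuelA = intersecGo xs ys m k (fuelA - (m - i)) := by
        apply intersecGo_advance xs ys k h.1 m hmle fuelA i hmge hfA
        intro p hp h1 h2
        have h2' : p < min (linFirst (xs.map Prod.fst) ((ys[k]'h.1).2 + 1) i) (linFirst (xs.map Prod.snd) (ys[k]'h.1).1 i) := by omega
        have hbS := linFirst_below (xs.map Prod.fst) ((ys[k]'h.1).2 + 1) i p h1 (lt_of_lt_of_le h2' (min_le_left _ _))
        have hbE := linFirst_below (xs.map Prod.snd) (ys[k]'h.1).1 i p h1 (lt_of_lt_of_le h2' (min_le_right _ _))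
        rw [hgetS p hp] at hbS
        rw [hgetE p hp] at hbE
        exact ⟨by omega, hbE⟩
      simp only [hjump]
      by_cases hmlx : m = xs.length
      · rw [if_pos hmlx, hadvance, hmlx]
        have : intersecGo xs ys xs.length k (fuelA - (xs.length - i)) = [] := by
          cases hfx : fuelA - (xs.length - i) with
          | zero => rw [intersecGo]
          | succ f => rw [intersecGo, dif_neg (by omega)]
        rw [this]
        have hd : ys.drop j = [] ↔ j = ys.length := by
          rw [List.drop_eq_nil_iff]; omega
        simp [eq_comm (a := ([] : List (Int × Int))), hd, Bool.beq_eq_decide_eq]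
      · rw [if_neg hmlx]
        have hmlt : m < xs.length := by omega
        obtain ⟨fA, hfAeq⟩ : ∃ f, fuelA - (m - i) = f + 1 := ⟨fuelA - (m - i) - 1, by omega⟩
        rw [hadvance, hfAeq, intersecGo, dif_pos (show m < xs.length ∧ k < ys.length from ⟨hmlt, h.1⟩)]
        rw [hgetS m hmlt, hgetE m hmlt]
        by_cases hskip : (xs[m]'hmlt).1 > (ys[k]'h.1).2
        · rw [if_pos hskip, if_pos (show (ys[k]'h.1).2 < (xs[m]'hmlt).1 from by omega)]
          exact ih m (k+1) j fA hj hmle (by omega) (by omega)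
        · rw [if_neg hskip]
          -- the ends-scan must be the active bound here: the starts-scan did not stop at m
          have hoverlap : (ys[k]'h.1).1 ≤ (xs[m]'hmlt).2 := by
            have hSm : ¬ (linFirst (xs.map Prod.fst) ((ys[k]'h.1).2 + 1) i = m) := by
              intro hx
              have := linFirst_at (xs.map Prod.fst) ((ys[k]'h.1).2 + 1) i (by rw [hx, hlenS]; exact hmlt)
              rw [hx, hgetS m hmlt] at this
              omega
            have hEm : linFirst (xs.map Prod.snd) (ys[k]'h.1).1 i = m := by omega
            have := linFirst_at (xs.map Prod.snd) (ys[k]'h.1).1 i (by rw [hEm, hlenE]; exact hmlt)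
            rw [hEm, hgetE m hmlt] at this
            exact this
          rw [if_neg (show ¬ ((ys[k]'h.1).2 < (xs[m]'hmlt).1) from by omega)]
          rw [if_neg (show ¬ ((ys[k]'h.1).1 > (xs[m]'hmlt).2) from by omega)]
          have hemit : (if (ys[k]'h.1).1 ≥ (xs[m]'hmlt).1 then
                (if (ys[k]'h.1).2 ≤ (xs[m]'hmlt).2 then (ys[k]'h.1) :: intersecGo xs ys m (k+1) fA
                 else ((ys[k]'h.1).1, (xs[m]'hmlt).2) :: intersecGo xs ys (m+1) k fA)
              else
                (if (ys[k]'h.1).2 ≤ (xs[m]'hmlt).2 then ((xs[m]'hmlt).1, (ys[k]'h.1).2) :: intersecGo xs ys m (k+1) fA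
                 else (xs[m]'hmlt) :: intersecGo xs ys (m+1) k fA)) =
              ((max (xs[m]'hmlt).1 (ys[k]'h.1).1, min (xs[m]'hmlt).2 (ys[k]'h.1).2) ::
                if (ys[k]'h.1).2 ≤ (xs[m]'hmlt).2 then intersecGo xs ys m (k+1) fA else intersecGo xs ys (m+1) k fA) := by
            by_cases h3 : (ys[k]'h.1).1 ≥ (xs[m]'hmlt).1 <;> by_cases h4 : (ys[k]'h.1).2 ≤ (xs[m]'hmlt).2 <;>
              simp [h3, h4, Prod.ext_iff] <;> omega
          rw [hemit]
          by_cases hjl : j < ys.length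
          · rw [dif_pos hjl, List.drop_eq_getElem_cons hjl]
            by_cases hne : (ys[j]'hjl) ≠ (max (xs[m]'hmlt).1 (ys[k]'h.1).1, min (xs[m]'hmlt).2 (ys[k]'h.1).2)
            · rw [if_pos hne]
              symm
              simp only [List.cons_eq_cons, decide_eq_false_iff_not]
              intro hh
              exact absurd hh.1.symm hne
            · rw [if_neg hne]
              rw [not_not] at hne
              by_cases h4 : (ys[k]'h.1).2 ≤ (xs[m]'hmlt).2
              · rw [if_pos h4, if_pos h4]
                rw [ih m (k+1) (j+1) fA (by omega) hmle (by omega) (by omega)]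
                simp only [List.cons_eq_cons, decide_eq_decide]
                exact ⟨fun hh => ⟨hne.symm, hh⟩, fun hh => hh.2⟩
              · rw [if_neg h4, if_neg h4]
                rw [ih (m+1) k (j+1) fA (by omega) (by omega) (by omega) (by omega)]
                simp only [List.cons_eq_cons, decide_eq_decide]
                exact ⟨fun hh => ⟨hne.symm, hh⟩, fun hh => hh.2⟩
          · rw [dif_neg hjl]
            have : ys.drop j = [] := List.drop_eq_nil_iff.mpr (by omega)
            simp [this]
    · rw [dif_neg h]
      have : intersecGo xs ys i k fuelA = [] := by
        cases fuelA with
        | zero => rw [intersecGo]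
        | succ f => rw [intersecGo, dif_neg (by tauto)]
      rw [this]
      have hd : ys.drop j = [] ↔ j = ys.length := by
        rw [List.drop_eq_nil_iff]; omega
      simp [eq_comm (a := ([] : List (Int × Int))), hd, Bool.beq_eq_decide_eq]

theorem bCovers_eq (xs x : List (Int × Int)) :
    bCoversGo (xs.map Prod.fst) (xs.map Prod.snd) (pvSparse (xs.map Prod.fst)) (pvSparse (xs.map Prod.snd)) xs.length x 0 0 0 (xs.length + x.length)
      = equal_itvs x (intersec xs x) := by
  rw [intersec, bCoversGo_eq_decide xs x (xs.length + x.length) 0 0 0 (xs.length + x.length) (by omega) (by omega) (by omega) (by omega), equal_itvs_eq_decide]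
  simp [eq_comm]

theorem bPickGo_length_le (starts ends : List Int) (tabS tabE : List (List Int)) (lx : Nat)
    (blocks : List (List (Int × Int))) (n : Int)
    (picked : List (List (Int × Int))) (h : (picked.length : Int) ≤ n) :
    ((bPickGo starts ends tabS tabE lx blocks n picked).length : Int) ≤ n := by
  induction blocks generalizing picked with
  | nil => simpa [bPickGo] using h
  | cons x rest ih =>
    rw [bPickGo]
    by_cases he : (picked.length : Int) = n
    · simp [he]
    · rw [if_neg (by simpa using he)]
      by_cases hc : bCoversGo starts ends tabS tabE lx x 0 0 0 (lx + x.length) = true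
      · rw [if_pos hc]
        exact ih (picked ++ [x]) (by simp; omega)
      · rw [if_neg hc]
        exact ih picked h

theorem extractGo_eq_bPickGo (itvs1 : List (Int × Int)) (itvs_ref : List (List (Int × Int))) (n : Int) :
    ∀ (fuel i : Nat) (picked : List (List (Int × Int))),
    itvs_ref.length - i ≤ fuel →
    (picked.length : Int) ≤ n →
    extractGo itvs1 itvs_ref (n - picked.length) i (picked.flatMap id) fuel =
      (n - ((bPickGo (itvs1.map Prod.fst) (itvs1.map Prod.snd) (pvSparse (itvs1.map Prod.fst)) (pvSparse (itvs1.map Prod.snd)) itvs1.length (itvs_ref.drop i) n picked).length : Int),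
       (bPickGo (itvs1.map Prod.fst) (itvs1.map Prod.snd) (pvSparse (itvs1.map Prod.fst)) (pvSparse (itvs1.map Prod.snd)) itvs1.length (itvs_ref.drop i) n picked).flatMap id) := by
  intro fuel
  induction fuel with
  | zero =>
    intro i picked hf h
    have hd : itvs_ref.drop i = [] := List.drop_eq_nil_iff.mpr (by omega)
    rw [hd, bPickGo, extractGo]
  | succ fuel ih =>
    intro i picked hf h
    by_cases hlt : i < itvs_ref.length
    · rw [List.drop_eq_getElem_cons hlt, bPickGo, extractGo]
      by_cases hstop : (picked.length : Int) = n
      · rw [dif_neg (by omega), if_pos (by simpa using hstop)]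
      · rw [if_neg (by simpa using hstop)]
        have hlt2 : (picked.length : Int) < n := lt_of_le_of_ne h hstop
        rw [dif_pos ⟨by omega, hlt⟩]
        rw [← bCovers_eq itvs1 (itvs_ref[i]'hlt)]
        by_cases hc : bCoversGo (itvs1.map Prod.fst) (itvs1.map Prod.snd) (pvSparse (itvs1.map Prod.fst)) (pvSparse (itvs1.map Prod.snd)) itvs1.length (itvs_ref[i]'hlt) 0 0 0 (itvs1.length + (itvs_ref[i]'hlt).length) = true
        · rw [if_pos hc, if_pos hc]
          have e1 : n - (picked.length : Int) - 1 = n - (((picked ++ [itvs_ref[i]'hlt]).length : Nat) : Int) := by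
            simp; omega
          have e2 : picked.flatMap id ++ (itvs_ref[i]'hlt) = (picked ++ [itvs_ref[i]'hlt]).flatMap id := by
            simp
          rw [e1, e2, ih (i+1) (picked ++ [itvs_ref[i]'hlt]) (by omega) (by simp; omega)]
        · rw [if_neg hc, if_neg hc]
          exact ih (i+1) picked (by omega) h
    · have hd : itvs_ref.drop i = [] := List.drop_eq_nil_iff.mpr (by omega)
      rw [hd, bPickGo, extractGo, dif_neg (by omega)]

-- ===== VERDICT (by name: the statement is the Claim_ definition above) =====
theorem extract_n_scattered_block_itv_spec : Claim_equal_extract_n_scattered_block_itv := by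
  intro itvs1 itvs_ref n _
  unfold Spec_extract_n_scattered_block_itv extract_n_scattered_block_itv extract_n_scattered_block_itv_alt
  by_cases hn : n ≤ 0
  · rw [if_pos hn]
    have : extractGo itvs1 itvs_ref n 0 [] itvs_ref.length = (n, []) := by
      cases hr : itvs_ref.length with
      | zero => rw [extractGo]
      | succ f => rw [extractGo, dif_neg (by omega)]
    rw [this]
    by_cases h0 : n = 0 <;> simp [h0, PySem.List.sorted2]
  · rw [if_neg hn]
    have key := extractGo_eq_bPickGo itvs1 itvs_ref n itvs_ref.length 0 [] (by omega) (by simp; omega)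
    simp only [List.length_nil, Nat.cast_zero, List.flatMap_nil, List.drop_zero] at key
    rw [show n - (0 : Int) = n by ring] at key
    have hle := bPickGo_length_le (itvs1.map Prod.fst) (itvs1.map Prod.snd) (pvSparse (itvs1.map Prod.fst)) (pvSparse (itvs1.map Prod.snd)) itvs1.length itvs_ref n [] (by simp; omega)
    rw [key]
    by_cases hfull : ((bPickGo (itvs1.map Prod.fst) (itvs1.map Prod.snd) (pvSparse (itvs1.map Prod.fst)) (pvSparse (itvs1.map Prod.snd)) itvs1.length itvs_ref n []).length : Int) = n
    · simp [hfull]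
    · have hlt : ((bPickGo (itvs1.map Prod.fst) (itvs1.map Prod.snd) (pvSparse (itvs1.map Prod.fst)) (pvSparse (itvs1.map Prod.snd)) itvs1.length itvs_ref n []).length : Int) < n := lt_of_le_of_ne hle hfull
      rw [if_pos hlt]
      rw [if_neg (by simpa using (by omega : ¬ n - ((bPickGo (itvs1.map Prod.fst) (itvs1.map Prod.snd) (pvSparse (itvs1.map Prod.fst)) (pvSparse (itvs1.map Prod.snd)) itvs1.length itvs_ref n []).length : Int) = 0))]
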